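-- pv_equiv track=rewrite | github.com/HOZH/leetCode | leetCodePython2020/1196.how-many-apples-can-you-put-into-the-basket.py | maxNumberOfApples
-- ===== SOURCE A (Python) =====
-- from typing import List
--
-- def maxNumberOfApples(weight: List[int]) -> int:
--
--     weight.sort()
--
--     current = 0
--     ans = 0
--     for i in weight:
--         current += i
--         if current > 5000:
--             break
--         ans+=1
--     return ans
-- ===== SOURCE B (Python) =====
-- from typing import List
--
-- def maxNumberOfApples(weight: List[int]) -> int:
--     # Run-length strategy: sort, then consume each block of equal weights at
--     # once, using floor division to decide how many copies of the value fit.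
--     # (Does not mutate the argument, unlike the original's in-place sort.)
--     ws = sorted(weight)
--     n = len(ws)
--     ans = 0
--     r = 5000
--     i = 0
--     while i < n:
--         v = ws[i]
--         j = i
--         while j < n and ws[j] == v:
--             j += 1
--         c = j - i
--         if v <= 0:
--             ans += c
--             r -= c * v
--         else:
--             q = min(c, r // v)
--             ans += q
--             if q < c:
--                 return ans
--             r -= q * v
--         i = j
--     return ans
-- ===== Notes on version B (the rewrite author's own statement) =====
-- stated objective: alternative
-- what changed: B replaces A's element-by-element accumulate-and-break over the sorted list by run-length batching: each block of equal weights is consumed in one step, with floor division deciding how many copies of a positive value still fit (B also leaves the input list unmutated, while A sorts it in place).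
import Mathlib
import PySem

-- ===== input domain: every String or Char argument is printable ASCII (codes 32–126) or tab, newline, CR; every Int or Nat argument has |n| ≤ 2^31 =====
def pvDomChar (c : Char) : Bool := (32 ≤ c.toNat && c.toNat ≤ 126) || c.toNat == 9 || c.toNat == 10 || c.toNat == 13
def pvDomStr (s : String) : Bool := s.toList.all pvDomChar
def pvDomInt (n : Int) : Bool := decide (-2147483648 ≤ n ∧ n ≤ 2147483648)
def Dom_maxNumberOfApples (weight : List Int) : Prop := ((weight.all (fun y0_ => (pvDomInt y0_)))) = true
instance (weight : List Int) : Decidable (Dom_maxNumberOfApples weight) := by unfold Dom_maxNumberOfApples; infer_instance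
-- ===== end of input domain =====

-- B replaces A's element-by-element accumulation over the sorted list by run-length batching
-- (each block of equal weights consumed at once via floor division); return values are equal,
-- but A sorts its argument in place while B leaves it unchanged (return-value equivalence only).

-- ===== PORT A =====
-- for i in weight: current += i; if current > 5000: break; ans += 1
def loopA : List Int → Int → Int → Int
  | [], _, ans => ans
  | i :: rest, current, ans =>
    if current + i > 5000 then ans else loopA rest (current + i) (ans + 1)

def maxNumberOfApples (weight : List Int) : Int :=
  loopA (PySem.List.sorted weight (fun x => x) false) 0 0

-- ===== PORT B =====
-- length of the leading run of v in the tail (Source B's inner `while ws[j] == v` scan)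
def runLen (v : Int) : List Int → Nat
  | [] => 0
  | x :: xs => if x = v then runLen v xs + 1 else 0

-- the list after that run (Source B's `i = j`)
def runDrop (v : Int) : List Int → List Int
  | [] => []
  | x :: xs => if x = v then runDrop v xs else x :: xs

theorem runDrop_length_le (v : Int) (l : List Int) : (runDrop v l).length ≤ l.length := by
  induction l with
  | nil => simp [runDrop]
  | cons x xs ih =>
    by_cases h : x = v
    · simp [runDrop, h]; omega
    · simp [runDrop, h]

-- Source B's outer while loop: one step per run of equal values
def loopB : List Int → Int → Int → Int
  | [], _, ans => ans
  | v :: rest, r, ans =>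
    let c : Int := (runLen v rest : Int) + 1
    if v ≤ 0 then loopB (runDrop v rest) (r - c * v) (ans + c)
    else
      let q := min c (PySem.Int.floordiv r v)
      if q < c then ans + q else loopB (runDrop v rest) (r - q * v) (ans + c)
termination_by l => l.length
decreasing_by all_goals exact Nat.lt_succ_of_le (runDrop_length_le v rest)

def maxNumberOfApples_alt (weight : List Int) : Int :=
  loopB (PySem.List.sorted weight (fun x => x) false) 5000 0

-- ===== PRECONDITION & SPEC =====
def Spec_maxNumberOfApples (weight : List Int) (out : Int) : Prop := out = maxNumberOfApples_alt weight
instance (weight : List Int) (out : Int) : Decidable (Spec_maxNumberOfApples weight out) := by unfold Spec_maxNumberOfApples; infer_instance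

-- ===== CLAIM (what is proved, stated in full; the proofs are below) =====
def Claim_equal_maxNumberOfApples : Prop := ∀ (weight : List Int), Dom_maxNumberOfApples weight → Spec_maxNumberOfApples weight (maxNumberOfApples weight)

-- ===== LEMMAS AND PROOFS =====

theorem runDecomp (v : Int) (l : List Int) :
    List.replicate (runLen v l) v ++ runDrop v l = l := by
  induction l with
  | nil => simp [runLen, runDrop]
  | cons x xs ih =>
    by_cases h : x = v
    · simp [runLen, runDrop, h, List.replicate_succ] at *; simpa [h] using ih
    · simp [runLen, runDrop, h]

-- consuming a run of k copies of a nonpositive value never breaks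
theorem repN (v : Int) (hv : v ≤ 0) (k : Nat) :
    ∀ (tail : List Int) (cur ans : Int), cur ≤ 5000 →
      loopA (List.replicate k v ++ tail) cur ans = loopA tail (cur + (k : Int) * v) (ans + (k : Int)) := by
  induction k with
  | zero => intro tail cur ans _; simp
  | succ k ih =>
    intro tail cur ans hcur
    have hb : ¬ (cur + v > 5000) := by omega
    rw [List.replicate_succ]
    simp only [List.cons_append, loopA, if_neg hb]
    rw [ih tail (cur + v) (ans + 1) (by omega)]
    push_cast
    ring_nf

-- consuming a run of k copies of a positive value: break iff fewer than k copies fit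
theorem repP (v : Int) (hv : 0 < v) (k : Nat) :
    ∀ (tail : List Int) (cur ans : Int), cur ≤ 5000 →
      loopA (List.replicate k v ++ tail) cur ans =
        if (5000 - cur) / v < (k : Int) then ans + (5000 - cur) / v
        else loopA tail (cur + (k : Int) * v) (ans + (k : Int)) := by
  induction k with
  | zero =>
    intro tail cur ans hcur
    have h0 : 0 ≤ (5000 - cur) / v := Int.ediv_nonneg (by omega) (by omega)
    simp only [Nat.cast_zero, if_neg (by omega : ¬ (5000 - cur) / v < (0:Int))]
    simp
  | succ k ih =>
    intro tail cur ans hcur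
    rw [List.replicate_succ]
    simp only [List.cons_append, loopA]
    by_cases hb : cur + v > 5000
    · have h1 : (5000 - cur) / v = 0 := Int.ediv_eq_zero_of_lt (by omega) (by omega)
      rw [if_pos hb, h1]
      rw [if_pos (by push_cast; omega)]
      omega
    · rw [if_neg hb, ih tail (cur + v) (ans + 1) (by omega)]
      have hdiv : (5000 - (cur + v)) / v = (5000 - cur) / v - 1 := by
        have := Int.add_mul_ediv_right (5000 - cur) (-1) (by omega : v ≠ 0)
        have he : 5000 - (cur + v) = 5000 - cur + (-1) * v := by ring
        rw [he, this]; ring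
      rw [hdiv]
      by_cases hc : (5000 - cur) / v - 1 < (k : Int)
      · rw [if_pos hc, if_pos (by push_cast; omega)]
        ring
      · rw [if_neg hc, if_neg (by push_cast; omega)]
        push_cast
        ring_nf

-- one unfolding step of loopB (stated as a lemma so it can rewrite the right-hand side first)
theorem loopB_cons (v : Int) (rest : List Int) (r ans : Int) :
    loopB (v :: rest) r ans =
      (if v ≤ 0 then loopB (runDrop v rest) (r - ((runLen v rest : Int) + 1) * v) (ans + ((runLen v rest : Int) + 1))
       else
         if min ((runLen v rest : Int) + 1) (PySem.Int.floordiv r v) < (runLen v rest : Int) + 1 then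
           ans + min ((runLen v rest : Int) + 1) (PySem.Int.floordiv r v)
         else loopB (runDrop v rest) (r - min ((runLen v rest : Int) + 1) (PySem.Int.floordiv r v) * v) (ans + ((runLen v rest : Int) + 1))) := by
  rw [loopB]

-- the two loops agree on every list and every budget state with cur ≤ 5000
theorem loop_eq : ∀ (n : Nat) (ws : List Int), ws.length ≤ n → ∀ (cur ans : Int), cur ≤ 5000 →
    loopA ws cur ans = loopB ws (5000 - cur) ans := by
  intro n
  induction n with
  | zero =>
    intro ws hlen cur ans _
    have : ws = [] := List.length_eq_zero_iff.mp (Nat.le_zero.mp hlen)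
    subst this; simp [loopA, loopB]
  | succ n ih =>
    intro ws hlen cur ans hcur
    match ws with
    | [] => simp [loopA, loopB]
    | v :: rest =>
      have hdec : List.replicate (runLen v rest) v ++ runDrop v rest = rest := runDecomp v rest
      have hws : v :: rest = List.replicate (runLen v rest + 1) v ++ runDrop v rest := by
        rw [List.replicate_succ, List.cons_append, hdec]
      have hlen' : (runDrop v rest).length ≤ n := by
        have := runDrop_length_le v rest
        simp at hlen; omega
      rw [loopB_cons]
      by_cases hv : v ≤ 0
      · rw [hws, repN v hv (runLen v rest + 1) _ cur ans hcur]
        have hmul : ((runLen v rest + 1 : Nat) : Int) * v ≤ 0 :=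
          mul_nonpos_of_nonneg_of_nonpos (by positivity) hv
        rw [ih _ hlen' _ _ (by omega)]
        simp only [if_pos hv]
        push_cast
        ring_nf
      · have hv' : 0 < v := by omega
        rw [hws, repP v hv' (runLen v rest + 1) _ cur ans hcur]
        have hfd : PySem.Int.floordiv (5000 - cur) v = (5000 - cur) / v :=
          PySem.Int.floordiv_eq_ediv_of_pos hv'
        simp only [if_neg hv, hfd]
        set m : Int := (runLen v rest : Int) with hm
        have hq0 : 0 ≤ (5000 - cur) / v := Int.ediv_nonneg (by omega) (by omega)
        by_cases hc : (5000 - cur) / v < m + 1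
        · rw [if_pos (by push_cast; omega)]
          have hmin : min (m + 1) ((5000 - cur) / v) = (5000 - cur) / v := by omega
          rw [hmin, if_pos (by omega)]
        · rw [if_neg (by push_cast; omega)]
          have hmin : min (m + 1) ((5000 - cur) / v) = m + 1 := by omega
          have hfit : (m + 1) * v ≤ 5000 - cur := by
            have := (Int.le_ediv_iff_mul_le hv').mp (by omega : m + 1 ≤ (5000 - cur) / v)
            linarith
          rw [hmin, if_neg (by omega)]
          rw [ih _ hlen' _ _ (by push_cast; nlinarith)]
          rw [hm]
          push_cast
          ring_nf

-- ===== VERDICT (by name: the statement is the Claim_ definition above) =====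
theorem maxNumberOfApples_spec : Claim_equal_maxNumberOfApples := by
  intro weight _
  unfold Spec_maxNumberOfApples maxNumberOfApples maxNumberOfApples_alt
  simpa using loop_eq (PySem.List.sorted weight (fun x => x) false).length _ le_rfl 0 0 (by omega)
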